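-- pv_equiv track=rewrite | github.com/Shunsuke-Torus/RSA_Variable | utils_insert.py | char_to_int
-- ===== SOURCE A (Python) =====
-- def char_to_int(P_C: str)->int:
--     P_C_list = list(P_C)#1文字ずつ格納。
--     P_C_size = len(P_C_list)#長さを入力
--     total = 0
--     num_list = []
--     for i in range(0,P_C_size):
--         num_list.append(ord(P_C_list[i])-32)#128-32=96 SPは除いていない
--     num_list.reverse()#1番　小さな数字をする
--
--     num_list_size = len(num_list)#OZ　ありがとう　L144とL151の書き方を統一したよ7/5
--
--     for i in range(0,num_list_size):
--         total += num_list[i]*pow(95,i)#asc2*95^i 文字　数字　etc 95種類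
--     return total
-- ===== SOURCE B (Python) =====
-- def char_to_int(P_C: str) -> int:
--     # Horner's rule: one left-to-right pass, no reversal, no pow() calls.
--     total = 0
--     for c in P_C:
--         total = total * 95 + (ord(c) - 32)
--     return total
-- ===== Notes on version B (the rewrite author's own statement) =====
-- stated objective: faster
-- what changed: Replaces the build-list/reverse/sum-with-pow(95,i) pipeline by a single left-to-right Horner accumulation total = total*95 + (ord(c)-32).
import Mathlib
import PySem

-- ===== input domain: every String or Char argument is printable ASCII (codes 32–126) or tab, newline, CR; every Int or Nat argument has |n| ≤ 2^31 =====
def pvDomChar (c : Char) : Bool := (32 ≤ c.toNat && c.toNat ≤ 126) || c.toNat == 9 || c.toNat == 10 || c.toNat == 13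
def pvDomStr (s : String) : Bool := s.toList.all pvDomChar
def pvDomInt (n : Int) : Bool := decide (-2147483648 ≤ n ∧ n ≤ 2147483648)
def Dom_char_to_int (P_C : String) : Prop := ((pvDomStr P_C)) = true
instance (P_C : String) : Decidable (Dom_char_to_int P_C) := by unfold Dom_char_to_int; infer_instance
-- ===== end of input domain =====

-- B replaces A's build-list/reverse/sum-with-pow pipeline by a single Horner pass (measured faster).

-- ===== PORT A =====
def char_to_int (P_C : String) : Int :=
  let P_C_list := P_C.toList
  let P_C_size : Int := PySem.List.len P_C_list
  let total : Int := 0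
  let num_list : List Int :=
    (PySem.List.pyRange 0 P_C_size 1).foldl
      (fun acc i => acc ++ [((PySem.List.pyGetD P_C_list i ' ').toNat : Int) - 32]) []
  let num_list := num_list.reverse
  let num_list_size : Int := PySem.List.len num_list
  (PySem.List.pyRange 0 num_list_size 1).foldl
    (fun t i => t + (PySem.List.pyGetD num_list i 0) * 95 ^ i.toNat) total

-- ===== PORT B =====
def char_to_int_alt (P_C : String) : Int :=
  P_C.toList.foldl (fun total c => total * 95 + ((c.toNat : Int) - 32)) 0

-- ===== PRECONDITION & SPEC =====
def Spec_char_to_int (P_C : String) (out : Int) : Prop := out = char_to_int_alt P_C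
instance (P_C : String) (out : Int) : Decidable (Spec_char_to_int P_C out) := by unfold Spec_char_to_int; infer_instance

-- ===== CLAIM (what is proved, stated in full; the proofs are below) =====
def Claim_equal_char_to_int : Prop := ∀ (P_C : String), Dom_char_to_int P_C → Spec_char_to_int P_C (char_to_int P_C)

-- ===== LEMMAS AND PROOFS =====

/-- Little-endian base-95 value of a digit list. -/
def pvVal : List Int → Int
  | [] => 0
  | d :: ds => d + 95 * pvVal ds

theorem pvVal_append_singleton (ds : List Int) (d : Int) :
    pvVal (ds ++ [d]) = pvVal ds + d * 95 ^ ds.length := by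
  induction ds with
  | nil => simp [pvVal]
  | cons x xs ih => simp [pvVal, ih, pow_succ]; ring

theorem pvSum (ds : List Int) :
    ((List.range ds.length).map (fun k => ds.getD k 0 * 95 ^ k)).sum = pvVal ds := by
  induction ds with
  | nil => simp [pvVal]
  | cons d ds ih =>
    rw [List.length_cons, List.range_succ_eq_map]
    simp only [List.map_cons, List.map_map, List.sum_cons, Function.comp_def,
      List.getD_cons_zero, pow_zero, mul_one, List.getD_cons_succ, pvVal, pow_succ]
    rw [show (fun k => ds.getD k 0 * (95 ^ k * 95)) = (fun k => (ds.getD k 0 * 95 ^ k) * 95) from by funext k; ring]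
    rw [List.sum_map_mul_right, ih]
    ring

/-- A's second loop on any digit list computes the little-endian value. -/
theorem pvLoopA (ds : List Int) (t : Int) :
    (PySem.List.pyRange 0 (ds.length : Int) 1).foldl
      (fun t i => t + (PySem.List.pyGetD ds i 0) * 95 ^ i.toNat) t = t + pvVal ds := by
  rw [PySem.List.foldl_add, PySem.List.pyRange_one]
  congr 1
  simp only [List.map_map, Function.comp_def, zero_add, sub_zero, Int.toNat_natCast,
    PySem.List.pyGetD_natCast]
  exact pvSum ds

/-- Horner's rule computes the little-endian value of the reversed digit list. -/
theorem pvHorner (cs : List Char) (t : Int) :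
    cs.foldl (fun total c => total * 95 + ((c.toNat : Int) - 32)) t
      = t * 95 ^ cs.length + pvVal ((cs.map (fun c => ((c.toNat : Int) - 32))).reverse) := by
  induction cs generalizing t with
  | nil => simp [pvVal]
  | cons c cs ih =>
    simp only [List.foldl_cons, ih, List.map_cons, List.reverse_cons,
      pvVal_append_singleton, List.length_cons, List.length_reverse, List.length_map,
      pow_succ]
    ring

theorem pvBuild (cs : List Char) :
    (PySem.List.pyRange 0 (PySem.List.len cs) 1).foldl
      (fun acc i => acc ++ [((PySem.List.pyGetD cs i ' ').toNat : Int) - 32]) []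
    = cs.map (fun c => ((c.toNat : Int) - 32)) := by
  rw [show PySem.List.len cs = ((cs.length : Int)) from by simp]
  rw [PySem.List.foldl_pyRange_zero_pyGetD' cs ' '
      (fun acc c => acc ++ [((c.toNat : Int) - 32)]) []]
  rw [PySem.List.foldl_append_singleton_eq_map]
  simp

-- ===== VERDICT (by name: the statement is the Claim_ definition above) =====
theorem char_to_int_spec : Claim_equal_char_to_int := by
  intro P_C _
  show char_to_int P_C = char_to_int_alt P_C
  unfold char_to_int char_to_int_alt
  simp only [pvBuild]
  rw [show PySem.List.len ((P_C.toList.map (fun c => ((c.toNat : Int) - 32))).reverse)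
        = (((P_C.toList.map (fun c => ((c.toNat : Int) - 32))).reverse).length : Int) from by simp]
  rw [pvLoopA, pvHorner]
  simp
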